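-- pv_equiv track=rewrite | github.com/zhuli19901106/leetcode-zhuli | max-chunks-to-make-sorted_1_AC.py | maxChunksToSorted
-- ===== SOURCE A (Python) =====
-- from typing import List
--
-- def maxChunksToSorted(arr: List[int]) -> int:
--     a = arr
--     n = len(a)
--     INT_MAX = 2 ** 31 - 1
--     INT_MIN = -(2 ** 31)
--     min_val = [[INT_MAX for j in range(n)] for i in range(n)]
--     max_val = [[INT_MIN for j in range(n)] for i in range(n)]
--     # as long as min and max values match, all in between will do
--     for i in range(n):
--         min_val[i][i] = max_val[i][i] = a[i]
--         for j in range(i + 1, n):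
--             min_val[i][j] = min(min_val[i][j - 1], a[j])
--             max_val[i][j] = max(max_val[i][j - 1], a[j])
--     res = 0
--     i = 0
--     while i < n:
--         j = i
--         # block-wise sorted
--         while j < n and not (min_val[i][j] == i and max_val[i][j] == j):
--             j += 1
--         i = j + 1
--         res += 1
--     return res
-- ===== SOURCE B (Python) =====
-- def maxChunksToSorted(arr):
--     # One pass: maintain the min/max of the current (open) chunk; close a chunk
--     # as soon as min == chunk start index and max == current index.
--     res = 0
--     start = 0
--     cur = None  # (min, max) of the open chunk, or None if no chunk is open
--     for j, x in enumerate(arr):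
--         if cur is None:
--             lo, hi = x, x
--         else:
--             lo, hi = min(cur[0], x), max(cur[1], x)
--         if lo == start and hi == j:
--             res += 1
--             start = j + 1
--             cur = None
--         else:
--             cur = (lo, hi)
--     if cur is not None:
--         res += 1
--     return res
-- ===== Notes on version B (the rewrite author's own statement) =====
-- stated objective: faster
-- what changed: Replaced the O(n^2) precomputed range-min/range-max tables plus nested while-scan with a single left-to-right pass that maintains the running min/max of the current open chunk and closes a chunk exactly when min == chunk start and max == current index.
import Mathlib
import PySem

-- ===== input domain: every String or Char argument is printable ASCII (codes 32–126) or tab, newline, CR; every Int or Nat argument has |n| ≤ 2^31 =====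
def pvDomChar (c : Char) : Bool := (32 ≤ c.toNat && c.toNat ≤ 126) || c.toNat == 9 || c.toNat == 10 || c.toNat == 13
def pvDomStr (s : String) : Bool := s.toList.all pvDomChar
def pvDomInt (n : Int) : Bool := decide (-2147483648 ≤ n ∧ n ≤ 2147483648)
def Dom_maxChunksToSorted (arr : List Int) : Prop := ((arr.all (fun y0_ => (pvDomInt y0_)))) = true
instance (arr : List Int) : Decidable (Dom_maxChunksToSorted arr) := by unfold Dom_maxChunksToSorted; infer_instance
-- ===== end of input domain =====

-- B replaces A's O(n^2) min/max tables + nested scans by one pass keeping the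
-- running min/max of the current open chunk (measured asymptotic speed-up).

-- ===== PORT A =====
-- 2D table access/update, as Python's min_val[i][j] on a list of lists
def pvGet2 (t : List (List Int)) (i j : Nat) : Int := (t.getD i []).getD j 0
def pvSet2 (t : List (List Int)) (i j : Nat) (v : Int) : List (List Int) :=
  t.set i ((t.getD i []).set j v)

-- inner 'while j < n and not (...)' scan
def pvScanJ (mn mx : List (List Int)) (n i j : Nat) : Nat :=
  if j < n then
    if pvGet2 mn i j = (i : Int) ∧ pvGet2 mx i j = (j : Int) then j
    else pvScanJ mn mx n i (j + 1)
  else j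
termination_by n - j

theorem pvScanJ_ge (mn mx : List (List Int)) (n i j : Nat) : j ≤ pvScanJ mn mx n i j := by
  unfold pvScanJ
  split
  · split
    · exact le_refl _
    · exact le_trans (Nat.le_succ j) (pvScanJ_ge mn mx n i (j + 1))
  · exact le_refl _
termination_by n - j

-- outer 'while i < n' loop
def pvWhile (mn mx : List (List Int)) (n i : Nat) (res : Int) : Int :=
  if h : i < n then
    pvWhile mn mx n (pvScanJ mn mx n i i + 1) (res + 1)
  else res
termination_by n - i
decreasing_by
  have := pvScanJ_ge mn mx n i i
  omega

-- body of 'for j in range(i+1, n)'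
def pvInner (a : List Int) (i : Nat) (mm : List (List Int) × List (List Int)) (j : Nat) :
    List (List Int) × List (List Int) :=
  (pvSet2 mm.1 i j (min (pvGet2 mm.1 i (j - 1)) (a.getD j 0)),
   pvSet2 mm.2 i j (max (pvGet2 mm.2 i (j - 1)) (a.getD j 0)))

-- body of 'for i in range(n)'
def pvOuter (a : List Int) (n : Nat) (mm : List (List Int) × List (List Int)) (i : Nat) :
    List (List Int) × List (List Int) :=
  (List.range' (i + 1) (n - (i + 1))).foldl (pvInner a i)
    (pvSet2 mm.1 i i (a.getD i 0), pvSet2 mm.2 i i (a.getD i 0))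

def maxChunksToSorted (arr : List Int) : Int :=
  let a := arr
  let n := a.length
  let INT_MAX : Int := 2 ^ 31 - 1
  let INT_MIN : Int := -(2 ^ 31)
  let init_min : List (List Int) := List.replicate n (List.replicate n INT_MAX)
  let init_max : List (List Int) := List.replicate n (List.replicate n INT_MIN)
  let mm := (List.range n).foldl (pvOuter a n) (init_min, init_max)
  pvWhile mm.1 mm.2 n 0 0

-- ===== PORT B =====
def pvStepB (st : Int × Int × Option (Int × Int)) (p : Int × Int) : Int × Int × Option (Int × Int) :=
  let lohi : Int × Int :=
    match st.2.2 with
    | none => (p.2, p.2)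
    | some c => (min c.1 p.2, max c.2 p.2)
  if lohi.1 = st.2.1 ∧ lohi.2 = p.1 then (st.1 + 1, p.1 + 1, none)
  else (st.1, st.2.1, some lohi)

def maxChunksToSorted_alt (arr : List Int) : Int :=
  let st := (PySem.List.enumerate arr 0).foldl pvStepB (0, 0, none)
  match st.2.2 with
  | none => st.1
  | some _ => st.1 + 1

-- ===== PRECONDITION & SPEC =====
def Spec_maxChunksToSorted (arr : List Int) (out : Int) : Prop := out = maxChunksToSorted_alt arr
instance (arr : List Int) (out : Int) : Decidable (Spec_maxChunksToSorted arr out) := by unfold Spec_maxChunksToSorted; infer_instance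

-- ===== CLAIM (what is proved, stated in full; the proofs are below) =====
def Claim_equal_maxChunksToSorted : Prop := ∀ (arr : List Int), Dom_maxChunksToSorted arr → Spec_maxChunksToSorted arr (maxChunksToSorted arr)

-- ===== LEMMAS AND PROOFS =====

-- range min / range max of a[i..j]
def rmn (a : List Int) (i j : Nat) : Int :=
  (List.range' (i + 1) (j - i)).foldl (fun m k => min m (a.getD k 0)) (a.getD i 0)
def rmx (a : List Int) (i j : Nat) : Int :=
  (List.range' (i + 1) (j - i)).foldl (fun m k => max m (a.getD k 0)) (a.getD i 0)

theorem rmn_self (a : List Int) (i : Nat) : rmn a i i = a.getD i 0 := by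
  simp [rmn]

theorem rmx_self (a : List Int) (i : Nat) : rmx a i i = a.getD i 0 := by
  simp [rmx]

theorem rmn_succ (a : List Int) (i j : Nat) (h : i ≤ j) :
    rmn a i (j + 1) = min (rmn a i j) (a.getD (j + 1) 0) := by
  have h1 : j + 1 - i = (j - i) + 1 := by omega
  have h2 : i + 1 + (j - i) = j + 1 := by omega
  rw [rmn, rmn, h1, List.range'_1_concat, h2]
  simp

theorem rmx_succ (a : List Int) (i j : Nat) (h : i ≤ j) :
    rmx a i (j + 1) = max (rmx a i j) (a.getD (j + 1) 0) := by
  have h1 : j + 1 - i = (j - i) + 1 := by omega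
  have h2 : i + 1 + (j - i) = j + 1 := by omega
  rw [rmx, rmx, h1, List.range'_1_concat, h2]
  simp

-- reference greedy, in terms of rmn/rmx
def gFind (a : List Int) (n i j : Nat) : Nat :=
  if j < n then
    if rmn a i j = (i : Int) ∧ rmx a i j = (j : Int) then j
    else gFind a n i (j + 1)
  else j
termination_by n - j

theorem gFind_ge (a : List Int) (n i j : Nat) : j ≤ gFind a n i j := by
  unfold gFind
  split
  · split
    · exact le_refl _
    · exact le_trans (Nat.le_succ j) (gFind_ge a n i (j + 1))
  · exact le_refl _
termination_by n - j

def gCount (a : List Int) (n i : Nat) (res : Int) : Int :=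
  if h : i < n then
    gCount a n (gFind a n i i + 1) (res + 1)
  else res
termination_by n - i
decreasing_by
  have := gFind_ge a n i i
  omega

-- row-level view of the inner loop body
def rowStep (f : Int → Int → Int) (a : List Int) (r : List Int) (j : Nat) : List Int :=
  r.set j (f (r.getD (j - 1) 0) (a.getD j 0))

-- finish step of B (the trailing open chunk counts as one chunk)
def bFin (st : Int × Int × Option (Int × Int)) : Int :=
  match st.2.2 with
  | none => st.1
  | some _ => st.1 + 1

theorem getD_set_self {α : Type} (t : List α) (i : Nat) (r d : α) (h : i < t.length) :
    (t.set i r).getD i d = r := by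
  simp [List.getD, h]

theorem getD_set_ne {α : Type} (t : List α) (i i' : Nat) (r d : α) (h : i' ≠ i) :
    (t.set i r).getD i' d = t.getD i' d := by
  simp [List.getD, Ne.symm h]

-- the inner fold only touches row i of each table
theorem inner_fold_rows (a : List Int) (i : Nat) (L : List Nat) :
    ∀ (t1 t2 : List (List Int)) (r1 r2 : List Int), i < t1.length → i < t2.length →
    L.foldl (pvInner a i) (t1.set i r1, t2.set i r2)
      = (t1.set i (L.foldl (rowStep min a) r1), t2.set i (L.foldl (rowStep max a) r2)) := by
  induction L with
  | nil => intro t1 t2 r1 r2 h1 h2; rfl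
  | cons j L ih =>
    intro t1 t2 r1 r2 h1 h2
    have e1 : pvInner a i (t1.set i r1, t2.set i r2) j
        = ((t1.set i r1).set i (rowStep min a r1 j), (t2.set i r2).set i (rowStep max a r2 j)) := by
      simp [pvInner, pvSet2, pvGet2, rowStep, List.getD, h1, h2]
    simp only [List.foldl_cons, e1, List.set_set]
    exact ih t1 t2 _ _ (by simpa using h1) (by simpa using h2)

-- filling one row computes the running extremum g
theorem row_fold_correct (f : Int → Int → Int) (a : List Int) (n i : Nat) (g : Nat → Int)
    (hg : ∀ k, i ≤ k → g (k + 1) = f (g k) (a.getD (k + 1) 0))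
    (tt : Nat) (q : List Int) (h1 : i < tt) (h2 : tt ≤ n) (hq : q.length = n)
    (hvals : ∀ k, i ≤ k → k < tt → q.getD k 0 = g k) :
    ((List.range' tt (n - tt)).foldl (rowStep f a) q).length = n ∧
    (∀ j, i ≤ j → j < n → ((List.range' tt (n - tt)).foldl (rowStep f a) q).getD j 0 = g j) := by
  by_cases h : tt < n
  · have hrange : n - tt = (n - (tt + 1)) + 1 := by omega
    rw [hrange, List.range'_succ, List.foldl_cons]
    have hstep : rowStep f a q tt = q.set tt (g tt) := by
      have e1 : q.getD (tt - 1) 0 = g (tt - 1) := hvals _ (by omega) (by omega)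
      have e2 : f (g (tt - 1)) (a.getD tt 0) = g tt := by
        have := hg (tt - 1) (by omega)
        rw [show tt - 1 + 1 = tt from by omega] at this
        exact this.symm
      rw [rowStep, e1, e2]
    rw [hstep]
    exact row_fold_correct f a n i g hg (tt + 1) (q.set tt (g tt)) (by omega) (by omega)
      (by simp [hq])
      (by
        intro k hk1 hk2
        by_cases hk : k = tt
        · subst hk; exact getD_set_self _ _ _ _ (by omega)
        · rw [getD_set_ne _ _ _ _ _ hk]; exact hvals _ hk1 (by omega))
  · have : n - tt = 0 := by omega
    rw [this]
    exact ⟨hq, fun j hj1 hj2 => hvals j hj1 (by omega)⟩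
termination_by n - tt

def tblInv (n : Nat) (t : List (List Int)) : Prop :=
  t.length = n ∧ ∀ i', i' < n → (t.getD i' []).length = n

def tblCorr (n s : Nat) (t : List (List Int)) (g : Nat → Nat → Int) : Prop :=
  ∀ i' j, i' < s → i' ≤ j → j < n → (t.getD i' []).getD j 0 = g i' j

theorem outer_fold_correct (a : List Int) (n s : Nat) (t1 t2 : List (List Int))
    (hs : s ≤ n) (hi1 : tblInv n t1) (hi2 : tblInv n t2)
    (hc1 : tblCorr n s t1 (rmn a)) (hc2 : tblCorr n s t2 (rmx a)) :
    tblCorr n n ((List.range' s (n - s)).foldl (pvOuter a n) (t1, t2)).1 (rmn a) ∧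
    tblCorr n n ((List.range' s (n - s)).foldl (pvOuter a n) (t1, t2)).2 (rmx a) := by
  by_cases h : s < n
  · have hrange : n - s = (n - (s + 1)) + 1 := by omega
    rw [hrange, List.range'_succ, List.foldl_cons]
    have hl1 : s < t1.length := by have := hi1.1; omega
    have hl2 : s < t2.length := by have := hi2.1; omega
    have hstep : pvOuter a n (t1, t2) s
        = (t1.set s ((List.range' (s + 1) (n - (s + 1))).foldl (rowStep min a)
              ((t1.getD s []).set s (a.getD s 0))),
           t2.set s ((List.range' (s + 1) (n - (s + 1))).foldl (rowStep max a)
              ((t2.getD s []).set s (a.getD s 0)))) := by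
      rw [pvOuter]
      simp only [pvSet2]
      exact inner_fold_rows a s _ t1 t2 _ _ hl1 hl2
    rw [hstep]
    have hr1 := row_fold_correct min a n s (rmn a s)
      (fun k hk => rmn_succ a s k hk) (s + 1) ((t1.getD s []).set s (a.getD s 0))
      (by omega) (by omega) (by simpa [List.getD] using hi1.2 s h)
      (by
        intro k hk1 hk2
        have hks : k = s := by omega
        rw [hks, getD_set_self _ _ _ _ (by rw [hi1.2 s h]; omega), rmn_self])
    have hr2 := row_fold_correct max a n s (rmx a s)
      (fun k hk => rmx_succ a s k hk) (s + 1) ((t2.getD s []).set s (a.getD s 0))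
      (by omega) (by omega) (by simpa [List.getD] using hi2.2 s h)
      (by
        intro k hk1 hk2
        have hks : k = s := by omega
        rw [hks, getD_set_self _ _ _ _ (by rw [hi2.2 s h]; omega), rmx_self])
    apply outer_fold_correct a n (s + 1) _ _ (by omega)
    · exact ⟨by simpa using hi1.1, by
        intro i' hi'
        by_cases hie : i' = s
        · subst hie; rw [getD_set_self _ _ _ _ hl1]; exact hr1.1
        · rw [getD_set_ne _ _ _ _ _ hie]; exact hi1.2 i' hi'⟩
    · exact ⟨by simpa using hi2.1, by
        intro i' hi'
        by_cases hie : i' = s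
        · subst hie; rw [getD_set_self _ _ _ _ hl2]; exact hr2.1
        · rw [getD_set_ne _ _ _ _ _ hie]; exact hi2.2 i' hi'⟩
    · intro i' j hi' hij hjn
      by_cases hie : i' = s
      · subst hie; rw [getD_set_self _ _ _ _ hl1]; exact hr1.2 j hij hjn
      · rw [getD_set_ne _ _ _ _ _ hie]; exact hc1 i' j (by omega) hij hjn
    · intro i' j hi' hij hjn
      by_cases hie : i' = s
      · subst hie; rw [getD_set_self _ _ _ _ hl2]; exact hr2.2 j hij hjn
      · rw [getD_set_ne _ _ _ _ _ hie]; exact hc2 i' j (by omega) hij hjn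
  · have : n - s = 0 := by omega
    rw [this]
    have hsn : s = n := by omega
    subst hsn
    exact ⟨hc1, hc2⟩

theorem scan_eq (a : List Int) (n i : Nat) (mn mx : List (List Int))
    (hmn : ∀ j, i ≤ j → j < n → pvGet2 mn i j = rmn a i j)
    (hmx : ∀ j, i ≤ j → j < n → pvGet2 mx i j = rmx a i j)
    (j : Nat) (hij : i ≤ j) : pvScanJ mn mx n i j = gFind a n i j := by
  unfold pvScanJ gFind
  by_cases h : j < n
  · rw [if_pos h, if_pos h, hmn j hij h, hmx j hij h]
    by_cases hc : rmn a i j = (i : Int) ∧ rmx a i j = (j : Int)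
    · rw [if_pos hc, if_pos hc]
    · rw [if_neg hc, if_neg hc]
      exact scan_eq a n i mn mx hmn hmx (j + 1) (by omega)
  · rw [if_neg h, if_neg h]
termination_by n - j

theorem while_eq (a : List Int) (n : Nat) (mn mx : List (List Int))
    (hmn : ∀ i j, i ≤ j → j < n → pvGet2 mn i j = rmn a i j)
    (hmx : ∀ i j, i ≤ j → j < n → pvGet2 mx i j = rmx a i j)
    (i : Nat) (res : Int) : pvWhile mn mx n i res = gCount a n i res := by
  unfold pvWhile gCount
  by_cases h : i < n
  · rw [dif_pos h, dif_pos h, scan_eq a n i mn mx (hmn i) (hmx i) i le_rfl]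
    exact while_eq a n mn mx hmn hmx (gFind a n i i + 1) (res + 1)
  · rw [dif_neg h, dif_neg h]
termination_by n - i
decreasing_by
  have := gFind_ge a n i i
  omega

theorem gFind_le (a : List Int) (n i j : Nat) (h : j ≤ n) : gFind a n i j ≤ n := by
  unfold gFind
  split
  · split
    · omega
    · exact gFind_le a n i (j + 1) (by omega)
  · exact h
termination_by n - j

theorem gFind_not (a : List Int) (n i j : Nat) :
    ∀ k, j ≤ k → k < gFind a n i j → ¬(rmn a i k = (i : Int) ∧ rmx a i k = (k : Int)) := by
  intro k hk1 hk2
  by_cases h : j < n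
  · by_cases hc : rmn a i j = (i : Int) ∧ rmx a i j = (j : Int)
    · have e : gFind a n i j = j := by unfold gFind; rw [if_pos h, if_pos hc]
      omega
    · by_cases hkj : k = j
      · subst hkj; exact hc
      · have e : gFind a n i j = gFind a n i (j + 1) := by
          conv_lhs => rw [gFind]
          rw [if_pos h, if_neg hc]
        exact gFind_not a n i (j + 1) k (by omega) (by omega)
  · have e : gFind a n i j = j := by unfold gFind; rw [if_neg h]
    omega
termination_by n - j

theorem gFind_cond (a : List Int) (n i j : Nat) (h2 : gFind a n i j < n) :
    rmn a i (gFind a n i j) = (i : Int) ∧ rmx a i (gFind a n i j) = ((gFind a n i j : Nat) : Int) := by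
  by_cases h : j < n
  · by_cases hc : rmn a i j = (i : Int) ∧ rmx a i j = (j : Int)
    · have e : gFind a n i j = j := by unfold gFind; rw [if_pos h, if_pos hc]
      rw [e]; exact hc
    · have e : gFind a n i j = gFind a n i (j + 1) := by
        conv_lhs => rw [gFind]
        rw [if_pos h, if_neg hc]
      rw [e] at h2 ⊢
      exact gFind_cond a n i (j + 1) h2
  · have e : gFind a n i j = j := by unfold gFind; rw [if_neg h]
    omega
termination_by n - j

-- B's fold over the elements before the first chunk boundary keeps the chunk open
theorem prefix_run (a : List Int) (i m : Nat) (him : i ≤ m) (hmn : m ≤ a.length)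
    (hno : ∀ k, i ≤ k → k < m → ¬(rmn a i k = (i : Int) ∧ rmx a i k = (k : Int)))
    (res : Int) :
    ((PySem.List.enumerate ((a.drop i).take (m - i)) (i : Int)).foldl pvStepB (res, (i : Int), none))
      = (res, (i : Int), if m = i then none else some (rmn a i (m - 1), rmx a i (m - 1))) := by
  by_cases he : m = i
  · rw [he]
    simp [PySem.List.enumerate_nil]
  · have h1 : m - i = (m - 1 - i) + 1 := by omega
    have hlen : m - 1 - i < (a.drop i).length := by simp; omega
    have hget : (a.drop i)[m - 1 - i]'hlen = a.getD (m - 1) 0 := by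
      rw [List.getElem_drop, List.getD_eq_getElem _ _ (by omega)]
      congr 1
      omega
    have hsplit : (a.drop i).take (m - i) = (a.drop i).take (m - 1 - i) ++ [a.getD (m - 1) 0] := by
      rw [h1, List.take_add_one, List.getElem?_eq_getElem hlen, hget]
      rfl
    have hlen2 : ((a.drop i).take (m - 1 - i)).length = m - 1 - i := by simp; omega
    rw [hsplit, PySem.List.enumerate_append, List.foldl_append,
      prefix_run a i (m - 1) (by omega) (by omega) (fun k hk1 hk2 => hno k hk1 (by omega)) res,
      hlen2]
    have hidx : (i : Int) + ((m - 1 - i : Nat) : Int) = ((m - 1 : Nat) : Int) := by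
      omega
    rw [hidx, PySem.List.enumerate_cons, PySem.List.enumerate_nil, List.foldl_cons, List.foldl_nil]
    have hcond := hno (m - 1) (by omega) (by omega)
    by_cases hmi : m - 1 = i
    · have hx1 : rmn a i (m - 1) = a.getD (m - 1) 0 := by rw [hmi, rmn_self]
      have hx2 : rmx a i (m - 1) = a.getD (m - 1) 0 := by rw [hmi, rmx_self]
      rw [hx1, hx2] at hcond
      rw [if_pos hmi]
      simp only [pvStepB]
      rw [if_neg (by simpa using hcond), if_neg he, hx1, hx2]
    · have hm2 : m - 1 - 1 + 1 = m - 1 := by omega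
      have hx1 := rmn_succ a i (m - 1 - 1) (by omega)
      have hx2 := rmx_succ a i (m - 1 - 1) (by omega)
      rw [hm2] at hx1 hx2
      rw [if_neg hmi]
      simp only [pvStepB]
      rw [← hx1, ← hx2, if_neg (by simpa using hcond), if_neg he]
termination_by m

theorem b_loop_eq (a : List Int) (i : Nat) (hin : i ≤ a.length) (res : Int) :
    bFin ((PySem.List.enumerate (a.drop i) (i : Int)).foldl pvStepB (res, (i : Int), none))
      = gCount a a.length i res := by
  by_cases h : i < a.length
  · set j := gFind a a.length i i with hj
    have hij : i ≤ j := gFind_ge a a.length i i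
    have hjn : j ≤ a.length := gFind_le a a.length i i (by omega)
    have hcond' := gFind_not a a.length i i
    by_cases hjlt : j < a.length
    · have hcond := gFind_cond a a.length i i hjlt
      rw [← hj] at hcond
      have hdd : (a.drop i).drop (j - i) = a.drop j := by
        rw [List.drop_drop]
        congr 1
        omega
      have hsplit : a.drop i
          = (a.drop i).take (j - i) ++ (a.getD j 0 :: a.drop (j + 1)) := by
        conv_lhs => rw [← List.take_append_drop (j - i) (a.drop i)]
        rw [hdd, List.drop_eq_getElem_cons hjlt, List.getD_eq_getElem _ _ hjlt]
      have hlen2 : ((a.drop i).take (j - i)).length = j - i := by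
        simp
        omega
      rw [hsplit, PySem.List.enumerate_append, List.foldl_append,
        prefix_run a i j hij hjn (by rw [hj]; exact hcond') res, hlen2]
      have hidx : (i : Int) + ((j - i : Nat) : Int) = ((j : Nat) : Int) := by omega
      rw [hidx, PySem.List.enumerate_cons, List.foldl_cons]
      have hstep : pvStepB (res, (i : Int),
            if j = i then none else some (rmn a i (j - 1), rmx a i (j - 1)))
            ((j : Int), a.getD j 0) = (res + 1, (j : Int) + 1, none) := by
        by_cases hji : j = i
        · rw [if_pos hji]
          simp only [pvStepB]
          have hc1 := hcond.1
          have hc2 := hcond.2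
          rw [hji, rmn_self] at hc1
          rw [hji, rmx_self] at hc2
          rw [if_pos (by rw [hji]; exact ⟨hc1, by rw [hc2]⟩)]
        · rw [if_neg hji]
          simp only [pvStepB]
          have hm2 : j - 1 + 1 = j := by omega
          have hx1 := rmn_succ a i (j - 1) (by omega)
          have hx2 := rmx_succ a i (j - 1) (by omega)
          rw [hm2] at hx1 hx2
          rw [← hx1, ← hx2, if_pos (by simpa using hcond)]
      rw [hstep]
      have hc1 : ((j : Int) + 1) = ((j + 1 : Nat) : Int) := by push_cast; ring
      rw [hc1, b_loop_eq a (j + 1) (by omega) (res + 1)]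
      have e1 : gCount a a.length i res = gCount a a.length (j + 1) (res + 1) := by
        conv_lhs => rw [gCount]
        rw [dif_pos h, ← hj]
      rw [e1]
    · have htake : (a.drop i).take (j - i) = a.drop i := by
        apply List.take_of_length_le
        simp
        omega
      rw [show a.drop i = (a.drop i).take (j - i) from htake.symm,
        prefix_run a i j hij hjn (by rw [hj]; exact hcond') res,
        if_neg (by omega)]
      have e1 : gCount a a.length i res = gCount a a.length (j + 1) (res + 1) := by
        conv_lhs => rw [gCount]
        rw [dif_pos h, ← hj]
      rw [e1]
      conv_rhs => rw [gCount]
      rw [dif_neg (by omega)]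
      simp [bFin]
  · have hie : i = a.length := by omega
    rw [hie, List.drop_length, PySem.List.enumerate_nil, List.foldl_nil]
    conv_rhs => rw [gCount]
    rw [dif_neg (by omega)]
    simp [bFin]
termination_by a.length - i
decreasing_by omega

theorem maxChunksToSorted_spec : Claim_equal_maxChunksToSorted := by
  unfold Claim_equal_maxChunksToSorted
  intro arr _
  unfold Spec_maxChunksToSorted
  simp only [maxChunksToSorted, maxChunksToSorted_alt]
  have hO := outer_fold_correct arr arr.length 0
      (List.replicate arr.length (List.replicate arr.length ((2 : Int) ^ 31 - 1)))
      (List.replicate arr.length (List.replicate arr.length (-((2 : Int) ^ 31))))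
      (by omega)
      ⟨by simp, by intro i' hi'; simp [List.getD, hi']⟩
      ⟨by simp, by intro i' hi'; simp [List.getD, hi']⟩
      (by intro i' j h0 _ _; exact absurd h0 (by omega))
      (by intro i' j h0 _ _; exact absurd h0 (by omega))
  simp only [Nat.sub_zero] at hO
  rw [← List.range_eq_range'] at hO
  rw [while_eq arr arr.length _ _
    (fun i k hik hkn => hO.1 i k (by omega) hik hkn)
    (fun i k hik hkn => hO.2 i k (by omega) hik hkn) 0 0]
  have hB := b_loop_eq arr 0 (by omega) 0
  simp only [List.drop_zero, Nat.cast_zero] at hB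
  rw [← hB]
  rfl
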